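-- pv_equiv track=rewrite | github.com/user01/example-nn | simple/tools.py | align_equations
-- ===== SOURCE A (Python) =====
-- def align_equations(equations):
--     """Convert n x m lists into aligned strings"""
--     max_equation_size = 0
--     for equation in equations:
--         max_equation_size = max(len(equation), max_equation_size)
--     equations = [equation + [''] *
--                  (max_equation_size - len(equation)) for equation in equations]
--
--     nth_size = [None] * len(equations[0])
--     for idx in range(0, len(equations[0])):
--         nth_size[idx] = max([len(equation[idx]) for equation in equations])
--
--     new_equations = [None] * len(equations)
--     for idx in range(0, len(equations)):
--         new_equations[idx] = ' '.join([('{0:>' + str(size) + '}').format(term)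
--                                        for term, size in zip(equations[idx], nth_size)])
--
--     return new_equations
-- ===== SOURCE B (Python) =====
-- def align_equations(equations):
--     """Convert n x m lists into aligned strings"""
--     ncols = 0
--     for row in equations:
--         if len(row) > ncols:
--             ncols = len(row)
--     outs = [''] * len(equations)
--     for c in range(ncols):
--         column = [row[c] if c < len(row) else '' for row in equations]
--         width = 0
--         for cell in column:
--             if len(cell) > width:
--                 width = len(cell)
--         sep = '' if c == 0 else ' '
--         outs = [out + sep + cell.rjust(width) for out, cell in zip(outs, column)]
--     return outs
-- ===== Notes on version B (the rewrite author's own statement) =====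
-- stated objective: alternative
-- what changed: B is column-major: it never formats a row at a time or materialises A's padded copy; instead it folds over the columns, and at each column computes that column's cells and width and appends the right-justified cell (plus separator) to every partial output string at once.
import Mathlib
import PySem

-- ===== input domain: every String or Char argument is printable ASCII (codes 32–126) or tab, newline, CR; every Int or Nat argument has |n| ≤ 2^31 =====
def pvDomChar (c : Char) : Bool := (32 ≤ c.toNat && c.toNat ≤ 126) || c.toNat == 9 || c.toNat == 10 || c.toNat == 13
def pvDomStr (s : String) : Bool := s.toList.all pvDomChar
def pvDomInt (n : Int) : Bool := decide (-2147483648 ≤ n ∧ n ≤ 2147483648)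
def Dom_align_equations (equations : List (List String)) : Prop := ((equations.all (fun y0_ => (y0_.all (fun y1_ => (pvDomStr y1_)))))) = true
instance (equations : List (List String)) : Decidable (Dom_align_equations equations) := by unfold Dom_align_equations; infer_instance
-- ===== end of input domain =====

-- B replaces A's row-at-a-time pipeline (pad every row, per-column width table, then format each row)
-- by a column-major fold that appends each column's right-justified cells to all partial outputs at
-- once; objective: alternative, same cost.

-- '{0:>w}'.format(term) / term.rjust(w): right-justify with spaces (exact for any string)
def pyRjust (s : String) (w : Nat) : String :=
  String.ofList (List.replicate (w - s.toList.length) ' ' ++ s.toList)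

-- max(<nonempty list>) in Python; A reaches it only on nonempty lists under Pre_
def pyMaxD (xs : List Nat) : Nat := (PySem.List.max? xs (fun x => x)).getD 0

-- ===== PORT A =====
-- A's local 'max_equation_size': running max of the row lengths
def aMaxSize (equations : List (List String)) : Nat :=
  equations.foldl (fun acc eq => max eq.length acc) 0

-- A's reassigned 'equations': every row padded with '' to the common length
def aPad (equations : List (List String)) : List (List String) :=
  equations.map (fun eq => eq ++ List.replicate (aMaxSize equations - eq.length) "")

-- A's 'nth_size': per-column max term length, scanned over the padded rows
def aNthSize (equations : List (List String)) : List Nat :=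
  (List.range ((aPad equations).headD []).length).map (fun idx =>
    pyMaxD ((aPad equations).map (fun eq => (eq.getD idx "").toList.length)))

def align_equations (equations : List (List String)) : List String :=
  (List.range (aPad equations).length).map (fun idx =>
    PySem.Str.join " " ((((aPad equations).getD idx []).zip (aNthSize equations)).map
      (fun ts => pyRjust ts.1 ts.2)))

-- ===== PORT B =====
-- one step of B's column loop: append sep + rjust(cell, width) to every partial output
def align_equations_alt (equations : List (List String)) : List String :=
  let ncols := equations.foldl (fun acc row => if acc < row.length then row.length else acc) 0
  (List.range ncols).foldl
    (fun outs c =>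
      let column := equations.map (fun row => row.getD c "")
      let width := column.foldl (fun w cell => if w < cell.toList.length then cell.toList.length else w) 0
      let sep : String := if c == 0 then "" else " "
      (outs.zip column).map (fun p =>
        String.ofList (p.1.toList ++ sep.toList ++ (pyRjust p.2 width).toList)))
    (equations.map (fun _ => ""))

-- ===== PRECONDITION & SPEC =====
-- A indexes equations[0] (IndexError on the empty list): Pre_ excludes exactly the empty list,
-- the only input on which A raises.
def Pre_align_equations (equations : List (List String)) : Prop := equations ≠ []
instance (equations : List (List String)) : Decidable (Pre_align_equations equations) := by unfold Pre_align_equations; infer_instance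
def pvWitness_align_equations : List (List String) := [["x", "+", "12"], ["sum", "="]]

def Spec_align_equations (equations : List (List String)) (out : List String) : Prop := out = align_equations_alt equations
instance (equations : List (List String)) (out : List String) : Decidable (Spec_align_equations equations out) := by unfold Spec_align_equations; infer_instance

-- ===== CLAIM (what is proved, stated in full; the proofs are below) =====
def Claim_equal_align_equations : Prop := ∀ (equations : List (List String)), Dom_align_equations equations → Pre_align_equations equations → Spec_align_equations equations (align_equations equations)

-- ===== LEMMAS AND PROOFS =====


-- padding with '' does not change getD with default ''
theorem pad_getD (eq : List String) (k i : Nat) :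
    (eq ++ List.replicate k "").getD i "" = eq.getD i "" := by
  unfold List.getD
  rcases lt_or_ge i eq.length with h | h
  · rw [List.getElem?_append_left h]
  · rw [List.getElem?_append_right h, List.getElem?_replicate, List.getElem?_eq_none h]
    split <;> rfl

-- the canonical column width: running max of the cell lengths down column c
def colW (equations : List (List String)) (c : Nat) : Nat :=
  equations.foldl (fun w row => max w (row.getD c "").toList.length) 0

-- B's ncols loop computes A's max_equation_size
theorem ncols_eq (equations : List (List String)) :
    equations.foldl (fun acc row => if acc < row.length then row.length else acc) 0
      = aMaxSize equations := by
  unfold aMaxSize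
  apply PySem.List.foldl_congr_mem
  intro acc y _
  split <;> omega

-- B's per-column width loop computes colW
theorem widthB_eq (equations : List (List String)) (c : Nat) :
    (equations.map (fun row => row.getD c "")).foldl
        (fun w cell => if w < cell.toList.length then cell.toList.length else w) 0
      = colW equations c := by
  unfold colW
  rw [List.foldl_map]
  apply PySem.List.foldl_congr_mem
  intro acc y _
  split <;> omega

-- every row length is bounded by A's running max
theorem len_le_maxSize (eqs : List (List String)) :
    ∀ e ∈ eqs, e.length ≤ aMaxSize eqs := by
  intro e he
  have : aMaxSize eqs = eqs.foldl (fun acc y => max acc y.length) 0 := by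
    apply PySem.List.foldl_congr_mem
    intro acc y _
    exact Nat.max_comm _ _
  rw [this]
  exact (PySem.List.le_foldl_max_nat eqs List.length 0).2 e he

-- a padded row has the common length
theorem pad_length (eqs : List (List String)) (e : List String) (he : e ∈ eqs) :
    (e ++ List.replicate (aMaxSize eqs - e.length) "").length = aMaxSize eqs := by
  have := len_le_maxSize eqs e he
  simp only [List.length_append, List.length_replicate]
  omega

-- the first padded row (A's len(equations[0]) after padding) has length aMaxSize
theorem head_pad_length (x : List String) (t : List (List String)) :
    ((aPad (x :: t)).headD []).length = aMaxSize (x :: t) := by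
  unfold aPad
  rw [List.map_cons, List.headD_cons]
  exact pad_length (x :: t) x (List.mem_cons_self)

-- A's nth_size[c] (Python's max over a nonempty padded column) is colW
theorem widthA_eq (x : List String) (t : List (List String)) (c : Nat) :
    pyMaxD ((aPad (x :: t)).map (fun eq => (eq.getD c "").toList.length))
      = colW (x :: t) c := by
  unfold pyMaxD aPad colW
  rw [List.map_map, List.map_cons, PySem.List.max?_id_cons, Option.getD_some]
  rw [List.foldl_map]
  simp only [Function.comp_apply, List.foldl_cons, Nat.zero_max]
  rw [pad_getD]
  apply PySem.List.foldl_congr_mem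
  intro acc y _
  rw [pad_getD]

-- the characters of B's partial output string for one row after the first k columns
def jChars (eqs : List (List String)) (row : List String) : Nat → List Char
  | 0 => []
  | k + 1 => jChars eqs row k ++ (if k == 0 then [] else [' '])
      ++ (pyRjust (row.getD k "") (colW eqs k)).toList

-- reading a list back by index over range(len) is the list itself (A's final loop shape)
theorem map_range_getD {α β : Type} (l : List α) (d : α) (f : α → β) :
    (List.range l.length).map (fun i => f (l.getD i d)) = l.map f := by
  apply List.ext_getElem
  · simp
  · intro j h1 h2
    have hj : j < l.length := by simpa using h2
    simp [List.getElem?_eq_getElem hj]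

-- A's zip of a padded row with nth_size is the per-column range map
theorem zip_eq_range (row prow : List String) (ns : List Nat) (W : Nat → Nat)
    (hlen : prow.length = ns.length)
    (hns : ∀ c (h : c < ns.length), ns[c] = W c)
    (hget : ∀ i, prow.getD i "" = row.getD i "") :
    (prow.zip ns).map (fun ts => pyRjust ts.1 ts.2)
      = (List.range ns.length).map (fun c => pyRjust (row.getD c "") (W c)) := by
  apply List.ext_getElem
  · simp [List.length_zip, hlen]
  · intro j h1 h2
    have hj : j < ns.length := by simpa using h2
    have hjp : j < prow.length := by omega
    simp only [List.getElem_map, List.getElem_zip, List.getElem_range]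
    rw [hns j hj]
    congr 1
    rw [← hget j, List.getD_eq_getElem _ _ hjp]

-- joining the first k rendered columns has exactly jChars's characters
theorem join_snoc (sep x : List Char) (l : List (List Char)) (h : l ≠ []) :
    PySem.Chars.join sep (l ++ [x]) = PySem.Chars.join sep l ++ sep ++ x := by
  induction l with
  | nil => exact absurd rfl h
  | cons a t ih =>
    cases t with
    | nil => simp [PySem.Chars.join_cons_cons, PySem.Chars.join_singleton]
    | cons b t2 =>
      simp only [List.cons_append]
      rw [PySem.Chars.join_cons_cons, PySem.Chars.join_cons_cons]
      have ih' := ih (by simp)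
      simp only [List.cons_append] at ih'
      rw [ih']
      simp [List.append_assoc]

theorem join_eq_jChars (eqs : List (List String)) (row : List String) (k : Nat) :
    (PySem.Str.join " " ((List.range k).map (fun c => pyRjust (row.getD c "") (colW eqs c)))).toList
      = jChars eqs row k := by
  induction k with
  | zero => simp [jChars, PySem.Chars.join, List.intercalate]
  | succ k ih =>
    rw [List.range_succ, List.map_append, List.map_singleton]
    cases k with
    | zero =>
      simp [jChars, PySem.Chars.join_singleton]
    | succ m =>
      have hne : (List.range (m + 1)).map (fun c => pyRjust (row.getD c "") (colW eqs c)) ≠ [] := by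
        simp [List.range_succ]
      rw [jChars, ← ih]
      simp only [PySem.Str.toList_join, List.map_append, List.map_singleton]
      rw [join_snoc]
      · simp
      · simp

-- B's fold over the first k columns produces jChars for every row
theorem fold_eq_jChars (eqs : List (List String)) (k : Nat) :
    (List.range k).foldl
      (fun outs c =>
        let column := eqs.map (fun row => row.getD c "")
        let width := column.foldl (fun w cell => if w < cell.toList.length then cell.toList.length else w) 0
        let sep : String := if c == 0 then "" else " "
        (outs.zip column).map (fun p =>
          String.ofList (p.1.toList ++ sep.toList ++ (pyRjust p.2 width).toList)))
      (eqs.map (fun _ => ""))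
      = eqs.map (fun row => String.ofList (jChars eqs row k)) := by
  induction k with
  | zero =>
    simp [jChars]
  | succ k ih =>
    rw [List.range_succ, List.foldl_append, ih]
    simp only [List.foldl_cons, List.foldl_nil]
    rw [widthB_eq, List.zip_map', List.map_map]
    apply List.map_congr_left
    intro row _
    simp only [Function.comp_apply]
    rw [jChars]
    congr 1
    simp only [String.toList_ofList]
    congr 1
    congr 1
    cases k <;> simp

-- ===== VERDICT (by name: the statements are the Claim_ definitions above) =====
theorem align_equations_spec : Claim_equal_align_equations := by
  intro eqs _ hpre
  obtain ⟨x, t, rfl⟩ := List.exists_cons_of_ne_nil hpre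
  unfold Spec_align_equations align_equations align_equations_alt
  rw [ncols_eq, fold_eq_jChars]
  rw [map_range_getD (aPad (x :: t)) []
        (fun row => PySem.Str.join " " ((row.zip (aNthSize (x :: t))).map (fun ts => pyRjust ts.1 ts.2)))]
  unfold aPad
  rw [List.map_map]
  apply List.map_congr_left
  intro row hrow
  simp only [Function.comp_apply]
  have hlen : (row ++ List.replicate (aMaxSize (x :: t) - row.length) "").length
      = (aNthSize (x :: t)).length := by
    rw [pad_length _ _ hrow]
    unfold aNthSize
    rw [List.length_map, List.length_range, head_pad_length]
  have hk : (aNthSize (x :: t)).length = aMaxSize (x :: t) := by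
    unfold aNthSize
    rw [List.length_map, List.length_range, head_pad_length]
  rw [zip_eq_range row _ (aNthSize (x :: t)) (colW (x :: t)) hlen
      (by
        intro c hc
        unfold aNthSize
        simp only [List.getElem_map, List.getElem_range]
        exact widthA_eq x t c)
      (fun i => pad_getD _ _ _)]
  rw [hk]
  apply String.ext
  rw [join_eq_jChars, String.toList_ofList]
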